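-- pv_equiv track=rewrite | github.com/abhilashMirupati/element_scorer_gemma_embedder | xpath_generator.py | _best_attr
-- ===== SOURCE A (Python) =====
-- from typing import Optional, Tuple, List, Dict, Any
--
-- def _best_attr(attrs: Dict[str, str]) -> Optional[Tuple[str, str]]:
--     """Get the best stable attribute from the priority order."""
--     priority_order = [
--         'data-testid', 'data-test', 'data-qa', 'data-automation-id',
--         'aria-label', 'name', 'role', 'value', 'title', 'alt', 'id'
--     ]
--
--     for attr in priority_order:
--         if attr in attrs and attrs[attr].strip():
--             return attr, attrs[attr]
--
--     return None
-- ===== SOURCE B (Python) =====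
-- from typing import Optional, Tuple, Dict
--
-- def _best_attr(attrs: Dict[str, str]) -> Optional[Tuple[str, str]]:
--     """Get the best stable attribute: one pass over the dict, keeping the
--     candidate with the smallest priority rank."""
--     priority_order = [
--         'data-testid', 'data-test', 'data-qa', 'data-automation-id',
--         'aria-label', 'name', 'role', 'value', 'title', 'alt', 'id'
--     ]
--     rank = {name: i for i, name in enumerate(priority_order)}
--     best = None
--     for attr, value in attrs.items():
--         if value.strip() and attr in rank:
--             r = rank[attr]
--             if best is None or r < best[0]:
--                 best = (r, attr, value)
--     return (best[1], best[2]) if best is not None else None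
-- ===== Notes on version B (the rewrite author's own statement) =====
-- stated objective: alternative
-- what changed: A short-circuits down the fixed priority list probing the dict for each name; B precomputes a name-to-rank dict once and makes a single pass over the dict's items, keeping the qualifying (non-blank after strip) entry with the smallest rank.
import Mathlib
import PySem

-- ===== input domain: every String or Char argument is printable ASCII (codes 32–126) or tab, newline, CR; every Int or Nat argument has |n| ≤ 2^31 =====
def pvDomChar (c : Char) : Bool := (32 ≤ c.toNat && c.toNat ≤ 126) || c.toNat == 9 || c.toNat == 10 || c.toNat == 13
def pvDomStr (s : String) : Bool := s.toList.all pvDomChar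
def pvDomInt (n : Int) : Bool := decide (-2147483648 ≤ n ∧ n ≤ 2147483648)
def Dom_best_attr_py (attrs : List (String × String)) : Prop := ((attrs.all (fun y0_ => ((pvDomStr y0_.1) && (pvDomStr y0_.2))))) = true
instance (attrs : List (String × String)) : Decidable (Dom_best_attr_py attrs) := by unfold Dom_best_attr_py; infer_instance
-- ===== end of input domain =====

-- B replaces A's short-circuit walk down the fixed priority list by one pass over the
-- dict's items keeping the candidate of minimum precomputed rank (objective: alternative).

-- ===== PORT A =====
def pvPriority : List String :=
  ["data-testid", "data-test", "data-qa", "data-automation-id",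
   "aria-label", "name", "role", "value", "title", "alt", "id"]

-- the 'for attr in priority_order: if attr in attrs and attrs[attr].strip(): return …' loop
def pvALoop (d : PySem.Dict String String) : List String → Option (String × String)
  | [] => none
  | a :: rest =>
    if d.contains a && (PySem.Str.len (PySem.Str.strip (d.getD a "")) != 0) then
      some (a, d.getD a "")
    else pvALoop d rest

def best_attr_py (attrs : List (String × String)) : Option (String × String) :=
  pvALoop (PySem.Dict.ofList attrs) pvPriority

-- ===== PORT B =====
-- rank = {name: i for i, name in enumerate(priority_order)}
def pvRank : PySem.Dict String Int :=
  PySem.Dict.ofList ((PySem.List.enumerate pvPriority 0).map (fun p => (p.2, p.1)))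

-- one iteration of 'for attr, value in attrs.items(): …' keeping the min-rank candidate
def pvBStep (best : Option (Int × String × String)) (p : String × String) :
    Option (Int × String × String) :=
  if PySem.Str.len (PySem.Str.strip p.2) != 0 then
    match pvRank.get? p.1 with
    | some r =>
      match best with
      | none => some (r, p.1, p.2)
      | some b => if r < b.1 then some (r, p.1, p.2) else some b
    | none => best
  else best

def best_attr_py_alt (attrs : List (String × String)) : Option (String × String) :=
  match (PySem.Dict.ofList attrs).items.foldl pvBStep none with
  | none => none
  | some b => some (b.2.1, b.2.2)

-- ===== PRECONDITION & SPEC =====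
def Spec_best_attr_py (attrs : List (String × String)) (out : Option (String × String)) : Prop := out = best_attr_py_alt attrs
instance (attrs : List (String × String)) (out : Option (String × String)) : Decidable (Spec_best_attr_py attrs out) := by unfold Spec_best_attr_py; infer_instance

-- ===== CLAIM (what is proved, stated in full; the proofs are below) =====
def Claim_equal_best_attr_py : Prop := ∀ (attrs : List (String × String)), Dom_best_attr_py attrs → Spec_best_attr_py attrs (best_attr_py attrs)

-- ===== LEMMAS AND PROOFS =====

-- A's per-attribute test, as a predicate on a priority name
def pvGood (d : PySem.Dict String String) (a : String) : Bool :=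
  d.contains a && (PySem.Str.len (PySem.Str.strip (d.getD a "")) != 0)

-- B's per-item test
def pvQual (p : String × String) : Bool :=
  (PySem.Str.len (PySem.Str.strip p.2) != 0) && (pvRank.get? p.1).isSome

lemma pvALoop_eq_find (d : PySem.Dict String String) (P : List String) :
    pvALoop d P = (P.find? (pvGood d)).map (fun a => (a, d.getD a "")) := by
  induction P with
  | nil => rfl
  | cons a rest ih =>
    rw [List.find?_cons]
    by_cases h : pvGood d a = true
    · simp only [pvALoop, pvGood] at *
      rw [if_pos h, h]; rfl
    · simp only [pvALoop, pvGood] at *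
      rw [if_neg h, ih, Bool.of_not_eq_true h]

lemma pvRank_eq (k : String) :
    pvRank.get? k = if k ∈ pvPriority then some (pvPriority.idxOf k) else none := by
  have hmk : pvRank = PySem.Dict.mk
      [("data-testid", 0), ("data-test", 1), ("data-qa", 2), ("data-automation-id", 3),
       ("aria-label", 4), ("name", 5), ("role", 6), ("value", 7), ("title", 8),
       ("alt", 9), ("id", 10)] := by rfl
  by_cases h1 : k = "data-testid"; · subst h1; decide
  by_cases h2 : k = "data-test"; · subst h2; decide
  by_cases h3 : k = "data-qa"; · subst h3; decide
  by_cases h4 : k = "data-automation-id"; · subst h4; decide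
  by_cases h5 : k = "aria-label"; · subst h5; decide
  by_cases h6 : k = "name"; · subst h6; decide
  by_cases h7 : k = "role"; · subst h7; decide
  by_cases h8 : k = "value"; · subst h8; decide
  by_cases h9 : k = "title"; · subst h9; decide
  by_cases h10 : k = "alt"; · subst h10; decide
  by_cases h11 : k = "id"; · subst h11; decide
  rw [hmk]
  rw [if_neg (by simp [pvPriority, h1, h2, h3, h4, h5, h6, h7, h8, h9, h10, h11])]
  simp [Ne.symm h1, Ne.symm h2, Ne.symm h3, Ne.symm h4,
    Ne.symm h5, Ne.symm h6, Ne.symm h7, Ne.symm h8, Ne.symm h9, Ne.symm h10, Ne.symm h11,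
    PySem.Dict.get?]

lemma pvFind_min_idx (P : List String) (p : String → Bool) (a k : String)
    (hf : P.find? p = some a) (hk : k ∈ P) (hpk : p k = true) :
    P.idxOf a ≤ P.idxOf k := by
  induction P with
  | nil => cases hf
  | cons x rest ih =>
    by_cases hx : p x = true
    · rw [List.find?_cons_of_pos hx] at hf
      injection hf with hf
      subst hf
      simp [List.idxOf_cons_self]
    · rw [List.find?_cons_of_neg hx] at hf
      have ha : p a = true := List.find?_some hf
      have hax : a ≠ x := fun h => hx (h ▸ ha)
      have hkx : k ≠ x := fun h => hx (h ▸ hpk)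
      have hk' : k ∈ rest := by
        rcases List.mem_cons.mp hk with h | h
        · exact absurd h hkx
        · exact h
      rw [List.idxOf_cons_ne _ (Ne.symm hax), List.idxOf_cons_ne _ (Ne.symm hkx)]
      exact Nat.succ_le_succ (ih hf hk')

lemma pvBStep_eq_none_iff (b : Option (Int × String × String)) (p : String × String) :
    pvBStep b p = none ↔ b = none ∧ pvQual p = false := by
  unfold pvBStep pvQual
  by_cases h1 : (PySem.Str.len (PySem.Str.strip p.2) != 0) = true
  · have h1' : ¬PySem.Chars.strip p.2.toList = [] := by simpa using h1
    rw [if_pos h1]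
    cases hr : pvRank.get? p.1 with
    | none => simp
    | some r =>
      cases b with
      | none => simp [h1']
      | some bb => by_cases hlt : r < bb.1 <;> simp [hlt, h1']
  · have h1' : PySem.Chars.strip p.2.toList = [] := by simpa using h1
    rw [if_neg h1]
    simp [h1']

lemma pvFold_none (l : List (String × String)) :
    ∀ b, l.foldl pvBStep b = none ↔ b = none ∧ ∀ p ∈ l, pvQual p = false := by
  induction l with
  | nil => intro b; simp
  | cons p rest ih =>
    intro b
    rw [List.foldl_cons, ih, pvBStep_eq_none_iff]
    constructor
    · rintro ⟨⟨hb, hq⟩, hall⟩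
      exact ⟨hb, fun q hq' => (List.mem_cons.mp hq').elim (fun h => h ▸ hq) (hall q)⟩
    · rintro ⟨hb, hall⟩
      exact ⟨⟨hb, hall p List.mem_cons_self⟩, fun q h => hall q (List.mem_cons_of_mem _ h)⟩

lemma pvBStep_cases (b : Option (Int × String × String)) (p : String × String) :
    (pvBStep b p = b ∧ pvQual p = false) ∨
    (pvQual p = true ∧ ∃ rp, pvRank.get? p.1 = some rp ∧
      (PySem.Str.len (PySem.Str.strip p.2) != 0) = true ∧
      ((b = none ∧ pvBStep b p = some (rp, p.1, p.2)) ∨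
       (∃ bb, b = some bb ∧
         ((rp < bb.1 ∧ pvBStep b p = some (rp, p.1, p.2)) ∨
          (bb.1 ≤ rp ∧ pvBStep b p = some bb))))) := by
  unfold pvBStep
  by_cases h1 : (PySem.Str.len (PySem.Str.strip p.2) != 0) = true
  · rw [if_pos h1]
    cases hr : pvRank.get? p.1 with
    | none => exact Or.inl ⟨rfl, by unfold pvQual; rw [hr]; simp⟩
    | some rp =>
      refine Or.inr ⟨by unfold pvQual; rw [hr, h1]; rfl, rp, rfl, h1, ?_⟩
      cases b with
      | none => exact Or.inl ⟨rfl, rfl⟩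
      | some bb =>
        refine Or.inr ⟨bb, rfl, ?_⟩
        by_cases hlt : rp < bb.1
        · refine Or.inl ⟨hlt, ?_⟩
          show (if rp < bb.1 then some (rp, p.1, p.2) else some bb) = some (rp, p.1, p.2)
          rw [if_pos hlt]
        · refine Or.inr ⟨le_of_not_gt hlt, ?_⟩
          show (if rp < bb.1 then some (rp, p.1, p.2) else some bb) = some bb
          rw [if_neg hlt]
  · rw [if_neg h1]
    exact Or.inl ⟨rfl, by unfold pvQual; simp only [Bool.of_not_eq_true h1, Bool.false_and]⟩

lemma pvFold_some (l : List (String × String)) :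
    ∀ (b : Option (Int × String × String)) (r : Int) (k v : String),
    l.foldl pvBStep b = some (r, k, v) →
    (b = some (r, k, v) ∨ ((k, v) ∈ l ∧ pvRank.get? k = some r ∧
        (PySem.Str.len (PySem.Str.strip v) != 0) = true)) ∧
    (∀ p ∈ l, pvQual p = true → ∀ r', pvRank.get? p.1 = some r' → r ≤ r') ∧
    (∀ b', b = some b' → r ≤ b'.1) := by
  induction l with
  | nil =>
    intro b r k v h
    simp only [List.foldl_nil] at h
    exact ⟨Or.inl h, by simp, fun b' hb => by rw [hb] at h; cases h; exact le_refl _⟩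
  | cons p rest ih =>
    intro b r k v h
    rw [List.foldl_cons] at h
    obtain ⟨hmem, hmin, hacc⟩ := ih (pvBStep b p) r k v h
    have hstep := pvBStep_cases b p
    refine ⟨?_, ?_, ?_⟩
    · -- membership
      rcases hmem with hm | ⟨hm, hrk, hs⟩
      · rcases hstep with ⟨heq, _⟩ | ⟨_, rp, hr, hs1, hcase⟩
        · rw [heq] at hm; exact Or.inl hm
        · have hsome : pvBStep b p = some (rp, p.1, p.2) →
              (b = some (r, k, v) ∨ ((k, v) ∈ p :: rest ∧ pvRank.get? k = some r ∧
                (PySem.Str.len (PySem.Str.strip v) != 0) = true)) := by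
            intro hc
            rw [hm] at hc
            injection hc with hc
            rw [Prod.mk.injEq, Prod.mk.injEq] at hc
            obtain ⟨e1, e2, e3⟩ := hc
            subst e1; subst e2; subst e3
            exact Or.inr ⟨List.mem_cons_self, hr, hs1⟩
          rcases hcase with ⟨_, hc⟩ | ⟨bb, hb, hc⟩
          · exact hsome hc
          · rcases hc with ⟨_, hc⟩ | ⟨_, hc⟩
            · exact hsome hc
            · rw [hm] at hc
              rw [hb, hc]
              exact Or.inl rfl
      · exact Or.inr ⟨List.mem_cons_of_mem _ hm, hrk, hs⟩
    · -- minimality over p :: rest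
      intro q hq hqq r' hr'
      rcases List.mem_cons.mp hq with hq1 | hq2
      · subst hq1
        rcases hstep with ⟨_, hfalse⟩ | ⟨_, rp, hr, _, hcase⟩
        · rw [hqq] at hfalse; cases hfalse
        · rw [hr] at hr'
          injection hr' with hr'
          subst hr'
          rcases hcase with ⟨_, hc⟩ | ⟨bb, _, hc⟩
          · exact hacc _ hc
          · rcases hc with ⟨_, hc⟩ | ⟨hle, hc⟩
            · exact hacc _ hc
            · exact le_trans (hacc _ hc) hle
      · exact hmin q hq2 hqq r' hr'
    · -- accumulator bound
      intro b' hb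
      rcases hstep with ⟨heq, _⟩ | ⟨_, rp, _, _, hcase⟩
      · exact hacc b' (hb ▸ heq)
      · rcases hcase with ⟨hbn, _⟩ | ⟨bb, hbb, hc⟩
        · rw [hb] at hbn; cases hbn
        · rw [hb] at hbb
          injection hbb with hbb
          subst hbb
          rcases hc with ⟨hlt, hc⟩ | ⟨_, hc⟩
          · exact le_of_lt (lt_of_le_of_lt (hacc _ hc) hlt)
          · exact hacc _ hc

-- a good priority name yields a qualifying item of the dict
lemma pvGood_to_item (d : PySem.Dict String String) (a : String)
    (hg : pvGood d a = true) (ha : a ∈ pvPriority) :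
    (a, d.getD a "") ∈ d.items ∧ pvRank.get? a = some (pvPriority.idxOf a) ∧
      (PySem.Str.len (PySem.Str.strip (d.getD a "")) != 0) = true := by
  unfold pvGood at hg
  obtain ⟨hc, hs⟩ := Bool.and_eq_true_iff.mp hg
  obtain ⟨v, hv⟩ : ∃ v, d.get? a = some v := by
    rw [PySem.Dict.contains_eq_isSome_get?] at hc
    exact Option.isSome_iff_exists.mp hc
  have hgd : d.getD a "" = v := PySem.Dict.getD_of_get?_eq_some d "" hv
  refine ⟨?_, by rw [pvRank_eq, if_pos ha], hs⟩
  rw [hgd]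
  exact PySem.Dict.mem_items_of_get?_eq_some d hv

-- a qualifying item of a nodup-keyed dict is a good priority name
lemma pvItem_to_good (d : PySem.Dict String String) (hnd : d.keys.Nodup)
    (k v : String) (hm : (k, v) ∈ d.items)
    (hs : (PySem.Str.len (PySem.Str.strip v) != 0) = true) :
    pvGood d k = true ∧ d.getD k "" = v := by
  have hv : d.get? k = some v := PySem.Dict.get?_of_mem_items d hm hnd
  have hgd : d.getD k "" = v := PySem.Dict.getD_of_get?_eq_some d "" hv
  refine ⟨?_, hgd⟩
  unfold pvGood
  rw [PySem.Dict.contains_eq_isSome_get?, hv, hgd]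
  simpa using hs

-- ===== VERDICT (by name: the statement is the Claim_ definition above) =====
theorem best_attr_py_spec : Claim_equal_best_attr_py := by
  intro attrs _
  unfold Spec_best_attr_py best_attr_py best_attr_py_alt
  set d := PySem.Dict.ofList attrs with hd
  have hnd : d.keys.Nodup := PySem.Dict.nodup_keys_ofList attrs
  rw [pvALoop_eq_find]
  cases hA : pvPriority.find? (pvGood d) with
  | none =>
    have hfold : d.items.foldl pvBStep none = none := by
      rw [pvFold_none]
      refine ⟨rfl, fun p hp => ?_⟩
      by_contra hq
      have hq : pvQual p = true := Bool.of_not_eq_false hq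
      obtain ⟨hs, hr⟩ := Bool.and_eq_true_iff.mp hq
      obtain ⟨r, hr⟩ := Option.isSome_iff_exists.mp hr
      have hk : p.1 ∈ pvPriority := by
        rw [pvRank_eq] at hr
        by_contra hmem
        rw [if_neg hmem] at hr; cases hr
      have hgood := (pvItem_to_good d hnd p.1 p.2 hp hs).1
      have := List.find?_eq_none.mp hA p.1 hk
      exact this hgood
    rw [hfold]
    rfl
  | some a =>
    have hga : pvGood d a = true := List.find?_some hA
    have ha : a ∈ pvPriority := List.mem_of_find?_eq_some hA
    obtain ⟨hitem, hrank, hstrip⟩ := pvGood_to_item d a hga ha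
    cases hfold : d.items.foldl pvBStep none with
    | none =>
      exfalso
      rw [pvFold_none] at hfold
      have := hfold.2 (a, d.getD a "") hitem
      unfold pvQual at this
      rw [hstrip, hrank] at this
      cases this
    | some res =>
      obtain ⟨r, k, v⟩ := res
      obtain ⟨hmem, hmin, -⟩ := pvFold_some d.items none r k v hfold
      rcases hmem with h | ⟨hm, hrk, hsv⟩
      · cases h
      -- k is a good priority name at index r
      have hk : k ∈ pvPriority ∧ r = pvPriority.idxOf k := by
        rw [pvRank_eq] at hrk
        by_cases hmem' : k ∈ pvPriority
        · rw [if_pos hmem'] at hrk; injection hrk with hrk; exact ⟨hmem', hrk.symm⟩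
        · rw [if_neg hmem'] at hrk; cases hrk
      obtain ⟨hgk, hgdk⟩ := pvItem_to_good d hnd k v hm hsv
      -- r ≤ idxOf a (minimality at the qualifying item (a, getD a ""))
      have hle1 : r ≤ (pvPriority.idxOf a : Int) := by
        refine hmin (a, d.getD a "") hitem ?_ _ hrank
        unfold pvQual
        rw [hstrip, hrank]
        rfl
      -- idxOf a ≤ idxOf k (a is the first good name)
      have hle2 : pvPriority.idxOf a ≤ pvPriority.idxOf k :=
        pvFind_min_idx pvPriority (pvGood d) a k hA hk.1 hgk
      have hreq : pvPriority.idxOf a = pvPriority.idxOf k := by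
        rw [hk.2] at hle1
        omega
      have hka : k = a := (List.idxOf_inj hk.1).mp hreq.symm
      subst hka
      have hva : v = d.getD k "" := hgdk.symm
      show Option.map (fun a => (a, d.getD a "")) (some k) = some (k, v)
      rw [hva]
      rfl
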